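-- pv_equiv track=rewrite | github.com/ha4/pyalg | ac3.py | freq_lookup
-- ===== SOURCE A (Python) =====
-- def freq_lookup(ftbl,fx):
--     a=0
--     b=len(ftbl)
--     while a<b:
--         c=(a+b)//2
--         if ftbl[c+1]<=fx: a=c+1
--         else: b=c
--     return a
-- ===== SOURCE B (Python) =====
-- def freq_lookup(ftbl, fx):
--     # Recursive search over the remaining SUFFIX of the table plus a running
--     # offset, instead of two absolute bounds: rest is the still-relevant
--     # suffix ftbl[pos:], w the active window width inside it.
--     def go(rest, w, pos):
--         if w <= 0:
--             return pos
--         h = w // 2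
--         if rest[h + 1] <= fx:
--             return go(rest[h + 1:], w - h - 1, pos + h + 1)
--         return go(rest, h, pos)
--     return go(ftbl, len(ftbl), 0)
-- ===== Notes on version B (the rewrite author's own statement) =====
-- stated objective: alternative
-- what changed: A's imperative while loop mutating two absolute bounds (a,b) into the full table is replaced by a recursive helper go(rest,w,pos) that searches the remaining suffix slice rest=ftbl[pos:] of shrinking width w and accumulates the offset pos, probing rest[w//2+1]; the probe sequence and cost are identical.
-- outside the precondition, e.g. on freq_lookup([5], 9): A raises IndexError, B raises IndexError; on freq_lookup([1, 2], 7): A raises IndexError, B raises IndexError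
import Mathlib
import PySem

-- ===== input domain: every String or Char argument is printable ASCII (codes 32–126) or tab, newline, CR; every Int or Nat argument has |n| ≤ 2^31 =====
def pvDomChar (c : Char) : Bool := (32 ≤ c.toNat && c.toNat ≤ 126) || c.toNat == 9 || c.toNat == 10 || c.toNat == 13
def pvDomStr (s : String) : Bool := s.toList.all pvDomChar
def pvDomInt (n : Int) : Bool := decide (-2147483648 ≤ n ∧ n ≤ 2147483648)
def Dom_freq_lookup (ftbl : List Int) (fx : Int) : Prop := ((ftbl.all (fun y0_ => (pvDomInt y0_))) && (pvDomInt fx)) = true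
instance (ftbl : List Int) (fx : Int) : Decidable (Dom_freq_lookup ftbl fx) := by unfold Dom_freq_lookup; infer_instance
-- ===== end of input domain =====

-- B replaces A's while loop over two absolute bounds (a,b) by a recursion on the
-- remaining SUFFIX slice of the table plus a running offset (alternative decomposition).

-- ===== PORT A =====
-- A's while loop: state (a,b), c=(a+b)//2, probe ftbl[c+1]; the IndexError
-- branch (pyGet? = none, excluded by Pre_) returns the junk value 0.
def freq_lookupLoop (ftbl : List Int) (fx : Int) (a b : Nat) : Int :=
  if _h : a < b then
    let c := (a + b) / 2
    match PySem.List.pyGet? ftbl ((c : Int) + 1) with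
    | none => 0          -- Python raises IndexError here; outside Pre_
    | some v => if v ≤ fx then freq_lookupLoop ftbl fx (c + 1) b
                else freq_lookupLoop ftbl fx a c
  else (a : Int)
termination_by b - a
decreasing_by all_goals omega

def freq_lookup (ftbl : List Int) (fx : Int) : Int :=
  freq_lookupLoop ftbl fx 0 ftbl.length

-- ===== PORT B =====
-- B's go(rest, w, pos): rest is the still-relevant suffix ftbl[pos:], w the
-- active window width inside it, pos the accumulated offset.
def freq_lookupGo (fx : Int) (rest : List Int) (w pos : Nat) : Int :=
  if _h : 0 < w then
    let h := w / 2
    match PySem.List.pyGet? rest ((h : Int) + 1) with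
    | none => 0          -- Python raises IndexError here; outside Pre_
    | some v =>
      if v ≤ fx then
        freq_lookupGo fx (PySem.List.slice rest (some ((h : Int) + 1)) none)
          (w - h - 1) (pos + h + 1)
      else freq_lookupGo fx rest h pos
  else (pos : Int)
termination_by w
decreasing_by all_goals omega

def freq_lookup_alt (ftbl : List Int) (fx : Int) : Int :=
  freq_lookupGo fx ftbl ftbl.length 0

-- ===== PRECONDITION & SPEC =====
-- The probe indices A visits while its upper bound still equals n = len(ftbl)
-- form a fixed ladder depending on n only: a₀ = 0, iₖ = (aₖ+n)//2 + 1, aₖ₊₁ = iₖ,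
-- stopping when iₖ = n.  Once some ladder entry satisfies ftbl[i] > fx the upper
-- bound drops below n and no later probe can reach index n, so A raises
-- IndexError exactly when ftbl is nonempty and every ladder entry is ≤ fx.
-- pvLadder is a pure arithmetic function of the LENGTH n (it never reads the
-- table, the query or either port): the strictly increasing index sequence
-- a ↦ (a+n)/2+1 while < n; the first argument is a structural bound on its
-- length (the sequence gains at least one index per step), not a loop re-run.
def pvLadderAux : Nat → Nat → Nat → List Nat
  | 0, _, _ => []
  | fuel + 1, n, a =>
    let i := (a + n) / 2 + 1
    if i < n then i :: pvLadderAux fuel n i else []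

def pvLadder (n a : Nat) : List Nat := pvLadderAux n n a

-- Pre_ excludes exactly the inputs on which the Python A raises IndexError
-- (nonempty ftbl whose entries on the fixed probe ladder of len(ftbl) are all ≤ fx).
def Pre_freq_lookup (ftbl : List Int) (fx : Int) : Prop :=
  ftbl = [] ∨ ∃ i ∈ pvLadder ftbl.length 0, fx < ftbl.getD i 0
instance (ftbl : List Int) (fx : Int) : Decidable (Pre_freq_lookup ftbl fx) := by
  unfold Pre_freq_lookup; infer_instance

def pvWitness_freq_lookup : List Int × Int := ([1, 2, 3, 4, 5], 2)

def Spec_freq_lookup (ftbl : List Int) (fx : Int) (out : Int) : Prop := out = freq_lookup_alt ftbl fx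
instance (ftbl : List Int) (fx : Int) (out : Int) : Decidable (Spec_freq_lookup ftbl fx out) := by unfold Spec_freq_lookup; infer_instance

-- ===== CLAIM (what is proved, stated in full; the proofs are below) =====
def Claim_equal_freq_lookup : Prop := ∀ (ftbl : List Int) (fx : Int), Dom_freq_lookup ftbl fx → Pre_freq_lookup ftbl fx → Spec_freq_lookup ftbl fx (freq_lookup ftbl fx)

-- ===== LEMMAS AND PROOFS =====
-- A's loop at (a, a+w) coincides with B's go on the suffix ftbl.drop a with
-- width w and offset a (for every input, in fact — even where both hit the
-- junk-value branch).
theorem freq_lookupLoop_eq_go (ftbl : List Int) (fx : Int) (a w : Nat) :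
    freq_lookupLoop ftbl fx a (a + w) = freq_lookupGo fx (ftbl.drop a) w a := by
  induction w using Nat.strong_induction_on generalizing a with
  | _ w ih =>
    rw [freq_lookupLoop, freq_lookupGo]
    by_cases hw : 0 < w
    · simp only [show a < a + w by omega, hw, dif_pos]
      have hc : (a + (a + w)) / 2 = a + w / 2 := by omega
      rw [hc]
      have hA : ((a + w / 2 : Nat) : Int) + 1 = ((a + w / 2 + 1 : Nat) : Int) := by push_cast; ring
      have hB : ((w / 2 : Nat) : Int) + 1 = ((w / 2 + 1 : Nat) : Int) := by push_cast; ring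
      rw [hA, hB, PySem.List.pyGet?_natCast, PySem.List.pyGet?_natCast,
        List.getElem?_drop, show a + (w / 2 + 1) = a + w / 2 + 1 by omega]
      cases ftbl[a + w / 2 + 1]? with
      | none => rfl
      | some v =>
        by_cases hv : v ≤ fx
        · simp only [hv, if_pos]
          rw [PySem.List.slice_from_natCast, List.drop_drop,
            show a + (w / 2 + 1) = a + w / 2 + 1 by omega,
            show a + w = (a + w / 2 + 1) + (w - w / 2 - 1) by omega,
            ih (w - w / 2 - 1) (by omega)]
        · simp only [hv, if_neg, not_false_iff]
          exact ih (w / 2) (by omega) a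
    · simp [show ¬ a < a + w by omega, hw]

-- ===== VERDICT (by name: the statement is the Claim_ definition above) =====
theorem freq_lookup_spec : Claim_equal_freq_lookup := by
  intro ftbl fx _ _
  unfold Spec_freq_lookup freq_lookup freq_lookup_alt
  simpa using freq_lookupLoop_eq_go ftbl fx 0 ftbl.length
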